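-- pv_equiv track=rewrite | github.com/iveresk/simple-converters-zoo | gsfirmware-checker/gsfirmware-checker.py | parsevoips
-- ===== SOURCE A (Python) =====
-- def parsevoips(scans):
--     res = []
--     bytefree = []
--     for i in range(0, len(scans)):
--         try:
--             bytefree.append(scans[i].split("b'")[1])
--         except:
--             bytefree.append(scans[i].split("b'")[0])
--     for i in range(1, len(bytefree), 2):
--         res.append(bytefree[i].split(" ")[0])
--         res.append(bytefree[i-1].split(":")[0])
--     return res
-- ===== SOURCE B (Python) =====
-- def parsevoips(scans):
--     res = []
--     prev = ""
--     for i, s in enumerate(scans):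
--         parts = s.split("b'")
--         try:
--             cur = parts[1]
--         except IndexError:
--             cur = parts[0]
--         if i % 2 == 1:
--             res.append(cur.split(" ")[0])
--             res.append(prev.split(":")[0])
--         prev = cur
--     return res
-- ===== Notes on version B (the rewrite author's own statement) =====
-- stated objective: alternative
-- what changed: Single enumerate pass carrying only the previous parsed element replaces A's two loops and its intermediate bytefree list; appends happen on odd indices.
import Mathlib
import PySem

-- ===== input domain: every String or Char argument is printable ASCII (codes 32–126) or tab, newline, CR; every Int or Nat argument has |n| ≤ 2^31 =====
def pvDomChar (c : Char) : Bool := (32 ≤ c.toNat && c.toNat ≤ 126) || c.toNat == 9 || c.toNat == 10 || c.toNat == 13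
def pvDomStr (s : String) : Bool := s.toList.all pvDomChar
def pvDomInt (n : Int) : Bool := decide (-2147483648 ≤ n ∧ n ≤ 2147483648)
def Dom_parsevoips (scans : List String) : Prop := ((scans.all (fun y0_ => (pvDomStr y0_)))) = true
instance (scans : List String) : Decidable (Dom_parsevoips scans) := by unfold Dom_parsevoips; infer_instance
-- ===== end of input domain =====

-- B replaces A's two sequential loops (building an intermediate `bytefree` list, then
-- pairing it by index) with one enumerate pass carrying only the previously parsed
-- element; objective: alternative decomposition, same O(n) cost.


-- shared helper: `try: s.split("b'")[1] except: s.split("b'")[0]` (both Pythons contain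
-- this very expression; split(…)[0] always exists since split returns a nonempty list)
def pvParse (s : String) : String :=
  -- split? is `some` here since the separator "b'" is nonempty
  let parts := (PySem.Str.split? s "b'").getD []
  match PySem.List.pyGet? parts 1 with
  | some x => x
  | none => PySem.List.pyGetD parts 0 ""

-- shared helper: `x.split(sep)[0]`
def pvTok (sep : String) (s : String) : String :=
  PySem.List.pyGetD ((PySem.Str.split? s sep).getD []) 0 ""

-- ===== PORT A =====
-- loop 1: for i in range(0, len(scans)): bytefree.append(parse(scans[i]))
-- loop 2: for i in range(1, len(bytefree), 2): res.append(bytefree[i].split(" ")[0]); res.append(bytefree[i-1].split(":")[0])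
def parsevoips (scans : List String) : List String :=
  let bytefree := (PySem.List.pyRange 0 (scans.length : Int) 1).foldl
    (fun bf i => bf ++ [pvParse (PySem.List.pyGetD scans i "")]) []
  (PySem.List.pyRange 1 (bytefree.length : Int) 2).foldl
    (fun res i => res ++ [pvTok " " (PySem.List.pyGetD bytefree i ""),
                          pvTok ":" (PySem.List.pyGetD bytefree (i - 1) "")]) []

-- ===== PORT B =====
-- one pass: for i, s in enumerate(scans): cur = parse(s); if i % 2 == 1: append both; prev = cur
def parsevoips_alt (scans : List String) : List String :=
  ((PySem.List.enumerate scans).foldl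
    (fun (st : List String × String) p =>
      let cur := pvParse p.2
      (if p.1 % 2 == 1 then st.1 ++ [pvTok " " cur, pvTok ":" st.2] else st.1, cur))
    ([], "")).1

-- ===== PRECONDITION & SPEC =====
def Spec_parsevoips (scans : List String) (out : List String) : Prop := out = parsevoips_alt scans
instance (scans : List String) (out : List String) : Decidable (Spec_parsevoips scans out) := by unfold Spec_parsevoips; infer_instance

-- ===== CLAIM (what is proved, stated in full; the proofs are below) =====
def Claim_equal_parsevoips : Prop := ∀ (scans : List String), Dom_parsevoips scans → Spec_parsevoips scans (parsevoips scans)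

-- ===== LEMMAS AND PROOFS =====

-- the common value both ports compute: pair consecutive parsed elements
def pvPairs : List String → List String
  | [] => []
  | [_] => []
  | a :: b :: t => pvTok " " b :: pvTok ":" a :: pvPairs t

theorem pvPyRange_two_nil (a b : Int) (h : b ≤ a) : PySem.List.pyRange a b 2 = [] := by
  simp [PySem.List.pyRange]
  omega

theorem pvPyRange_two_cons (a b : Int) (h : a < b) :
    PySem.List.pyRange a b 2 = a :: PySem.List.pyRange (a + 2) b 2 := by
  simp only [PySem.List.pyRange]
  norm_num
  rw [if_pos h]
  have hc : ((b - a + 2 - 1) / 2).toNat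
      = (if a + 2 < b then ((b - (a + 2) + 2 - 1) / 2).toNat else 0) + 1 := by
    split_ifs with h2 <;> omega
  rw [hc, List.range_succ_eq_map, List.map_cons, List.map_map]
  refine List.cons_eq_cons.mpr ⟨by norm_num, ?_⟩
  apply List.map_congr_left
  intro k _
  simp [Function.comp, Nat.succ_eq_add_one]
  ring

-- A's first loop builds scans.map pvParse
theorem pvLoop1 (scans : List String) :
    (PySem.List.pyRange 0 (scans.length : Int) 1).foldl
      (fun bf i => bf ++ [pvParse (PySem.List.pyGetD scans i "")]) []
    = scans.map pvParse := by
  rw [PySem.List.foldl_pyRange_zero_pyGetD' scans "" (fun bf s => bf ++ [pvParse s]) []]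
  rw [PySem.List.foldl_append_singleton_eq_map]
  simp

-- A's second loop, generalized over an already-consumed even-free prefix `pre`
theorem pvLoop2 (bf pre acc : List String) :
    (PySem.List.pyRange ((pre.length : Int) + 1) ((pre.length : Int) + (bf.length : Int)) 2).foldl
      (fun res i => res ++ [pvTok " " (PySem.List.pyGetD (pre ++ bf) i ""),
                            pvTok ":" (PySem.List.pyGetD (pre ++ bf) (i - 1) "")]) acc
    = acc ++ pvPairs bf := by
  match bf with
  | [] => rw [pvPyRange_two_nil _ _ (by simp)]; simp [pvPairs]
  | [a] => rw [pvPyRange_two_nil _ _ (by simp)]; simp [pvPairs]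
  | a :: b :: t =>
    rw [pvPyRange_two_cons _ _ (by simp)]
    rw [List.foldl_cons]
    have h1 : PySem.List.pyGetD (pre ++ a :: b :: t) ((pre.length : Int) + 1) "" = b := by
      have : (pre.length : Int) + 1 = ((pre.length + 1 : Nat) : Int) := by omega
      rw [this, PySem.List.pyGetD_natCast]
      simp [List.getD]
    have h0 : PySem.List.pyGetD (pre ++ a :: b :: t) ((pre.length : Int) + 1 - 1) "" = a := by
      have : (pre.length : Int) + 1 - 1 = ((pre.length : Nat) : Int) := by omega
      rw [this, PySem.List.pyGetD_natCast]
      simp [List.getD]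
    rw [h1, h0]
    have hre : pre ++ a :: b :: t = (pre ++ [a, b]) ++ t := by simp
    have key := pvLoop2 t (pre ++ [a, b]) (acc ++ [pvTok " " b, pvTok ":" a])
    rw [hre]
    have harg1 : (pre.length : Int) + 1 + 2 = (((pre ++ [a, b]).length : Int)) + 1 := by
      simp; ring
    have harg2 : (pre.length : Int) + ((a :: b :: t).length : Int)
        = ((pre ++ [a, b]).length : Int) + (t.length : Int) := by
      simp; ring
    rw [harg1, harg2, key]
    simp [pvPairs]

-- B's loop, generalized over an even start index, arbitrary accumulator and prev
theorem pvLoopB (xs : List String) (s : Int) (acc : List String) (prev : String)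
    (hs : s % 2 = 0) :
    ((PySem.List.enumerate xs s).foldl
      (fun (st : List String × String) p =>
        let cur := pvParse p.2
        (if p.1 % 2 == 1 then st.1 ++ [pvTok " " cur, pvTok ":" st.2] else st.1, cur))
      (acc, prev)).1
    = acc ++ pvPairs (xs.map pvParse) := by
  match xs with
  | [] => simp [pvPairs]
  | [a] =>
    simp only [PySem.List.enumerate_cons, PySem.List.enumerate_nil, List.foldl_cons,
      List.foldl_nil]
    have : (s % 2 == 1) = false := by simp; omega
    simp [this, pvPairs]
  | a :: b :: t =>
    simp only [PySem.List.enumerate_cons, List.foldl_cons]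
    have h1 : (s % 2 == 1) = false := by simp; omega
    have h2 : ((s + 1) % 2 == 1) = true := by simp; omega
    simp only [h1, h2, if_false, if_true, Bool.false_eq_true]
    have key := pvLoopB t (s + 1 + 1) (acc ++ [pvTok " " (pvParse b), pvTok ":" (pvParse a)])
      (pvParse b) (by omega)
    simp only [key]
    simp [pvPairs]

-- ===== VERDICT (by name: the statement is the Claim_ definition above) =====
theorem parsevoips_spec : Claim_equal_parsevoips := by
  intro scans _
  unfold Spec_parsevoips parsevoips parsevoips_alt
  simp only [pvLoop1]
  have hA := pvLoop2 (scans.map pvParse) [] []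
  simp only [List.length_nil, Nat.cast_zero, zero_add, List.nil_append] at hA
  have hB := pvLoopB scans 0 [] "" (by omega)
  rw [hB]
  rw [← hA]
  simp
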